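-- pv_equiv track=rewrite | github.com/Jerempire/gym-anything | benchmarks/cua_world/environments/graphite_env/tasks/cross_tier_infrastructure_health/verifier.py | _find_graph_for_tier
-- ===== SOURCE A (Python) =====
-- def _targets_contain(targets, keywords):
--     """Return True if any target contains ALL keywords (case-insensitive)."""
--     for t in targets:
--         tl = t.lower()
--         if all(kw.lower() in tl for kw in keywords):
--             return True
--     return False
--
-- def _find_graph_for_tier(graphs, expected_title, metric_keywords, require_function=None):
--     """
--     Find the best matching graph for a tier.
--     Returns (found_exact_title, targets) or (False, None).
--     """
--     # Exact title match first
--     for title, targets in graphs: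
--         if title == expected_title:
--             if require_function:
--                 if _targets_contain(targets, [require_function] + metric_keywords):
--                     return True, targets
--                 return True, targets  # title found but function may be missing
--             return True, targets
--
--     # Case-insensitive title match
--     for title, targets in graphs:
--         if expected_title.lower() in title.lower():
--             return False, targets  # close title but not exact
--
--     # Fall back: find by metric content
--     for title, targets in graphs:
--         if _targets_contain(targets, metric_keywords):
--             return False, targets
--
--     return False, None
-- ===== SOURCE B (Python) =====
-- def _targets_contain(targets, keywords):
--     """Return True if any target contains ALL keywords (case-insensitive)."""
--     return any(all(kw.lower() in t.lower() for kw in keywords) for t in targets)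
--
-- def _find_graph_for_tier(graphs, expected_title, metric_keywords, require_function=None):
--     """Single pass: return exact title match immediately; otherwise remember the
--     first case-insensitive title candidate and the first metric-content candidate."""
--     ci_candidate = None
--     metric_candidate = None
--     et_lower = expected_title.lower()
--     for title, targets in graphs:
--         if title == expected_title:
--             return True, targets
--         if ci_candidate is None and et_lower in title.lower():
--             ci_candidate = targets
--         if metric_candidate is None and _targets_contain(targets, metric_keywords):
--             metric_candidate = targets
--     if ci_candidate is not None:
--         return False, ci_candidate
--     if metric_candidate is not None:
--         return False, metric_candidate
--     return False, None
-- ===== Notes on version B (the rewrite author's own statement) =====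
-- stated objective: alternative
-- what changed: Replaces A's three sequential scans of graphs with one single pass that returns on exact title match and records the first case-insensitive-title and first metric-content candidates, picked in that order after the loop.
import Mathlib
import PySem

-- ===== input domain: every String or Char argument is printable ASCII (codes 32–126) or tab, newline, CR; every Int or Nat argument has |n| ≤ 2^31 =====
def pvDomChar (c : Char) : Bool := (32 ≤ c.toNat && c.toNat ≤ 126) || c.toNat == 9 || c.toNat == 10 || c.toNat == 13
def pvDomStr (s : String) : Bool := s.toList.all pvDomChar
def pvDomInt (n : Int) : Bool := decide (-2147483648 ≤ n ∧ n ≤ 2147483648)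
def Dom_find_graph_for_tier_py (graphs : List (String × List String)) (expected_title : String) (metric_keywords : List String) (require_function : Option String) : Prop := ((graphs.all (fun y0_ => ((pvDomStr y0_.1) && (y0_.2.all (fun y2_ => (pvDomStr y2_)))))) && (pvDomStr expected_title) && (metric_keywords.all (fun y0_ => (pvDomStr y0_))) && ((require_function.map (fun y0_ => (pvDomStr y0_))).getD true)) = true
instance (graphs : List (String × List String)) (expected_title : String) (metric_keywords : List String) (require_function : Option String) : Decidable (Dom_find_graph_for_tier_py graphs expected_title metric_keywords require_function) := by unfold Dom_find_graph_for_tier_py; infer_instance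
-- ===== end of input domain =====

-- B replaces A's three sequential scans of the graph list with a single pass that keeps
-- the first case-insensitive-title and first metric-content candidates (objective: alternative decomposition).

-- ===== PORT A =====
-- _targets_contain: loop over targets, early return True
def pvTargetsContainA (targets keywords : List String) : Bool :=
  match targets with
  | [] => false
  | t :: rest =>
    let tl := PySem.Str.lower t
    if keywords.all (fun kw => PySem.Str.isIn (PySem.Str.lower kw) tl) then true
    else pvTargetsContainA rest keywords

-- first loop of A: exact title match (returns the targets of the first exact match)
def pvExactA (graphs : List (String × List String)) (expected_title : String) : Option (List String) :=
  match graphs with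
  | [] => none
  | (title, targets) :: rest =>
    if title == expected_title then some targets else pvExactA rest expected_title

-- second loop of A: case-insensitive title match
def pvCiA (graphs : List (String × List String)) (expected_title : String) : Option (List String) :=
  match graphs with
  | [] => none
  | (title, targets) :: rest =>
    if PySem.Str.isIn (PySem.Str.lower expected_title) (PySem.Str.lower title) then some targets
    else pvCiA rest expected_title

-- third loop of A: metric-content match
def pvMetricA (graphs : List (String × List String)) (metric_keywords : List String) : Option (List String) :=
  match graphs with
  | [] => none
  | (_, targets) :: rest =>
    if pvTargetsContainA targets metric_keywords then some targets
    else pvMetricA rest metric_keywords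

def find_graph_for_tier_py (graphs : List (String × List String)) (expected_title : String) (metric_keywords : List String) (require_function : Option String) : Bool × Option (List String) :=
  match pvExactA graphs expected_title with
  | some targets =>
    -- 'if require_function:' — truthy test (None and "" are falsy)
    match require_function with
    | some rf =>
      if rf ≠ "" then
        if pvTargetsContainA targets (rf :: metric_keywords) then (true, some targets)
        else (true, some targets)  -- title found but function may be missing
      else (true, some targets)
    | none => (true, some targets)
  | none =>
    match pvCiA graphs expected_title with
    | some targets => (false, some targets)
    | none =>
      match pvMetricA graphs metric_keywords with
      | some targets => (false, some targets)
      | none => (false, none)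

-- ===== PORT B =====
-- _targets_contain in B: any/all expression
def pvTargetsContainB (targets keywords : List String) : Bool :=
  targets.any (fun t => keywords.all (fun kw => PySem.Str.isIn (PySem.Str.lower kw) (PySem.Str.lower t)))

-- B's single pass carrying the two candidates
def pvLoopB (expected_title : String) (et_lower : String) (metric_keywords : List String)
    (graphs : List (String × List String)) (ci metC : Option (List String)) : Bool × Option (List String) :=
  match graphs with
  | [] =>
    match ci with
    | some t => (false, some t)
    | none =>
      match metC with
      | some t => (false, some t)
      | none => (false, none)
  | (title, targets) :: rest =>
    if title == expected_title then (true, some targets)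
    else
      let ci' := if ci.isNone && PySem.Str.isIn et_lower (PySem.Str.lower title) then some targets else ci
      let metC' := if metC.isNone && pvTargetsContainB targets metric_keywords then some targets else metC
      pvLoopB expected_title et_lower metric_keywords rest ci' metC'

def find_graph_for_tier_py_alt (graphs : List (String × List String)) (expected_title : String) (metric_keywords : List String) (require_function : Option String) : Bool × Option (List String) :=
  pvLoopB expected_title (PySem.Str.lower expected_title) metric_keywords graphs none none

-- ===== PRECONDITION & SPEC =====
def Spec_find_graph_for_tier_py (graphs : List (String × List String)) (expected_title : String) (metric_keywords : List String) (require_function : Option String) (out : Bool × Option (List String)) : Prop := out = find_graph_for_tier_py_alt graphs expected_title metric_keywords require_function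
instance (graphs : List (String × List String)) (expected_title : String) (metric_keywords : List String) (require_function : Option String) (out : Bool × Option (List String)) : Decidable (Spec_find_graph_for_tier_py graphs expected_title metric_keywords require_function out) := by unfold Spec_find_graph_for_tier_py; infer_instance

-- ===== CLAIM (what is proved, stated in full; the proofs are below) =====
def Claim_equal_find_graph_for_tier_py : Prop := ∀ (graphs : List (String × List String)) (expected_title : String) (metric_keywords : List String) (require_function : Option String), Dom_find_graph_for_tier_py graphs expected_title metric_keywords require_function → Spec_find_graph_for_tier_py graphs expected_title metric_keywords require_function (find_graph_for_tier_py graphs expected_title metric_keywords require_function)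

-- ===== LEMMAS AND PROOFS =====

theorem tc_eq (targets keywords : List String) :
    pvTargetsContainB targets keywords = pvTargetsContainA targets keywords := by
  induction targets with
  | nil => rfl
  | cons t rest ih =>
    simp only [pvTargetsContainB, List.any_cons, pvTargetsContainA] at *
    split <;> simp_all

-- what B's loop computes, in terms of A's three scans
theorem loopB_spec (expected_title : String) (metric_keywords : List String)
    (graphs : List (String × List String)) (ci metC : Option (List String)) :
    pvLoopB expected_title (PySem.Str.lower expected_title) metric_keywords graphs ci metC =
      match pvExactA graphs expected_title with
      | some t => (true, some t)
      | none =>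
        match (match ci with | some t => some t | none => pvCiA graphs expected_title) with
        | some t => (false, some t)
        | none =>
          match (match metC with | some t => some t | none => pvMetricA graphs metric_keywords) with
          | some t => (false, some t)
          | none => (false, none) := by
  induction graphs generalizing ci metC with
  | nil => cases ci <;> cases metC <;> rfl
  | cons g rest ih =>
    obtain ⟨title, targets⟩ := g
    by_cases h : (title == expected_title) = true
    · simp [pvLoopB, pvExactA, h]
    · simp only [pvLoopB, pvExactA, pvCiA, pvMetricA, h, Bool.false_eq_true,
        if_false, ih, tc_eq]
      cases ci <;> cases metC <;>
        simp only [Option.isNone_none, Option.isNone_some, Bool.true_and, Bool.false_and] <;>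
        split_ifs <;> simp_all

theorem find_graph_for_tier_py_spec : Claim_equal_find_graph_for_tier_py := by
  intro graphs expected_title metric_keywords require_function _
  show _ = _
  unfold find_graph_for_tier_py find_graph_for_tier_py_alt
  rw [loopB_spec]
  cases h : pvExactA graphs expected_title with
  | none => rfl
  | some t =>
    cases require_function with
    | none => rfl
    | some rf => by_cases hrf : rf = "" <;> simp [hrf]
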